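-- pv_equiv track=rewrite | github.com/diem/off-chain-reference | src/offchainapi/status_logic.py | filter_for_starting_states
-- ===== SOURCE A (Python) =====
-- from collections import defaultdict
--
-- def filter_for_starting_states(lattice, starting_states):
--     ''' Returns all transitions reacheable from the starting states '''
--     lattice_map = defaultdict(set)
--     for (st, nd) in lattice:
--         lattice_map[st].add(nd)
--
--     reach = set()
--     for item in starting_states:
--         to_explore = set([item])
--         while to_explore != set():
--             next = to_explore.pop()
--             reach.add(next)
--             to_explore |= lattice_map[next] - reach
--
--     lattice = [(st, en) for (st, en) in lattice if st in reach]
--     return lattice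
-- ===== SOURCE B (Python) =====
-- def filter_for_starting_states(lattice, starting_states):
--     ''' Returns all transitions reacheable from the starting states '''
--     # Round-based saturation: no adjacency map, no worklist.  Starting from the
--     # set of starting states, repeatedly add the target of every edge whose
--     # source is already reached; len(lattice) rounds are enough, since each
--     # round before the fixpoint adds at least one new edge target.
--     reach = set(starting_states)
--     for _ in range(len(lattice)):
--         reach = reach | {en for (st, en) in lattice if st in reach}
--     return [(st, en) for (st, en) in lattice if st in reach]
-- ===== Notes on version B (the rewrite author's own statement) =====
-- stated objective: simpler
-- what changed: Replaced the adjacency-map plus per-node worklist (defaultdict of successor sets, set.pop loop per starting state) by round-based saturation: len(lattice) rounds, each adding the targets of all edges whose source is already reached; no map, no worklist.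
import Mathlib
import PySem

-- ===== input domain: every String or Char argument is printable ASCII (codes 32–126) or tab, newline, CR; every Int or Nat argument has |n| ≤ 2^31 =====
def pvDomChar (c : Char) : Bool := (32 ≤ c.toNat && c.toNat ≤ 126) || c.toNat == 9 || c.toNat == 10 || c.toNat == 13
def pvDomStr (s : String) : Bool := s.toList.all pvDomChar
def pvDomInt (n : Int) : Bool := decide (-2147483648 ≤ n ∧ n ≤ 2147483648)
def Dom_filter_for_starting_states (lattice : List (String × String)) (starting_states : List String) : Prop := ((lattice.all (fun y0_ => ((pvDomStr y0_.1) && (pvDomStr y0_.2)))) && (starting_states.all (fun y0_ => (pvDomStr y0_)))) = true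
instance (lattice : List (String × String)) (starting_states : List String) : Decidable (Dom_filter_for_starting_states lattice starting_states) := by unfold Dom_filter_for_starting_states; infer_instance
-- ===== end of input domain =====

-- B replaces A's adjacency map + per-start-state worklist by round-based edge saturation
-- (len(lattice) rounds over the edge list), a simpler loop; same return value.

-- ===== PORT A =====
-- lattice_map = defaultdict(set); for (st, nd) in lattice: lattice_map[st].add(nd)
-- (reading a missing key in the loop below yields the empty set: ported as getD with default ∅;
-- defaultdict's insertion of an empty set on such a read only mutates the map, never the result)
def aLatticeMap (lattice : List (String × String)) : PySem.Dict String (PySem.Set String) :=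
  lattice.foldl (fun d p => d.insert p.1 (PySem.Set.add (d.getD p.1 PySem.Set.empty) p.2)) PySem.Dict.empty

-- the 'while to_explore != set()' loop.  Python's set.pop() removes an element in unspecified
-- hash order; it is ported as taking the first element of the Set's list — the reach set, and
-- hence the returned edge list, do not depend on that order.  The fuel argument only makes the
-- recursion total; the proofs below show the fuel passed by filter_for_starting_states suffices.
def aLoop (m : PySem.Dict String (PySem.Set String)) :
    Nat → PySem.Set String → PySem.Set String → PySem.Set String
  | 0, reach, _ => reach
  | fuel+1, reach, toExplore =>
    match toExplore with
    | [] => reach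
    | next :: rest =>
      let reach' := PySem.Set.add reach next
      aLoop m fuel reach'
        (PySem.Set.union rest (PySem.Set.diff (m.getD next PySem.Set.empty) reach'))

def aFuel (lattice : List (String × String)) (starting_states : List String) : Nat :=
  ((PySem.Set.ofList (starting_states ++ lattice.map Prod.snd)).length + 2) ^ 2

def filter_for_starting_states (lattice : List (String × String)) (starting_states : List String) : List (String × String) :=
  let m := aLatticeMap lattice
  let reach := starting_states.foldl
    (fun reach item => aLoop m (aFuel lattice starting_states) reach (PySem.Set.ofList [item]))
    PySem.Set.empty
  lattice.filter (fun p => PySem.Set.contains reach p.1)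

-- ===== PORT B =====
-- reach = reach | {en for (st, en) in lattice if st in reach}
def bStep (lattice : List (String × String)) (reach : PySem.Set String) : PySem.Set String :=
  PySem.Set.union reach ((lattice.filter (fun p => PySem.Set.contains reach p.1)).map Prod.snd)

-- reach = set(starting_states); for _ in range(len(lattice)): reach = reach | {…}
def filter_for_starting_states_alt (lattice : List (String × String)) (starting_states : List String) : List (String × String) :=
  let reach := (List.range lattice.length).foldl
    (fun reach _ => bStep lattice reach) (PySem.Set.ofList starting_states)
  lattice.filter (fun p => PySem.Set.contains reach p.1)

-- ===== PRECONDITION & SPEC =====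
def Spec_filter_for_starting_states (lattice : List (String × String)) (starting_states : List String) (out : List (String × String)) : Prop := out = filter_for_starting_states_alt lattice starting_states
instance (lattice : List (String × String)) (starting_states : List String) (out : List (String × String)) : Decidable (Spec_filter_for_starting_states lattice starting_states out) := by unfold Spec_filter_for_starting_states; infer_instance

-- ===== CLAIM (what is proved, stated in full; the proofs are below) =====
def Claim_equal_filter_for_starting_states : Prop := ∀ (lattice : List (String × String)) (starting_states : List String), Dom_filter_for_starting_states lattice starting_states → Spec_filter_for_starting_states lattice starting_states (filter_for_starting_states lattice starting_states)

-- ===== LEMMAS AND PROOFS =====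

-- 'R contains, with each edge source it contains, also the edge's target'
def pvClosed (lattice : List (String × String)) (R : List String) : Prop :=
  ∀ p ∈ lattice, p.1 ∈ R → p.2 ∈ R

-- termination measure of A's while loop (proof-only; never computed by the ports)
def pvMu (univ reach t : List String) : Nat :=
  (univ.filter (fun x => decide (x ∉ reach))).length * (univ.length + 2) + t.length

theorem pvNodupSubsetLength {l u : List String} (h : l.Nodup) (hs : ∀ x ∈ l, x ∈ u) :
    l.length ≤ u.length := by
  calc l.length = l.toFinset.card := (List.toFinset_card_of_nodup h).symm
    _ ≤ u.toFinset.card := Finset.card_le_card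
        (by intro x hx; simp only [List.mem_toFinset] at *; exact hs x hx)
    _ ≤ u.length := List.toFinset_card_le u

theorem pvUnionSubset {s t : List String} (h : ∀ x ∈ t, x ∈ s) : PySem.Set.union s t = s := by
  induction t generalizing s with
  | nil => rfl
  | cons a t ih =>
    show PySem.Set.union (PySem.Set.add s a) t = s
    rw [PySem.Set.add_of_mem (h a (by simp))]
    exact ih (fun x hx => h x (by simp [hx]))

theorem pvUnionAppend (s t : List String) : ∃ ext, PySem.Set.union s t = s ++ ext := by
  induction t generalizing s with
  | nil => exact ⟨[], (List.append_nil s).symm⟩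
  | cons a t ih =>
    show ∃ ext, PySem.Set.union (PySem.Set.add s a) t = s ++ ext
    rw [PySem.Set.add_eq_ite]
    split
    · exact ih s
    · obtain ⟨e, he⟩ := ih (s ++ [a]); exact ⟨[a] ++ e, by simp [he]⟩

theorem pvSingleton (x : String) : PySem.Set.ofList [x] = [x] :=
  PySem.Set.ofList_eq_self_of_nodup (xs := [x]) (List.nodup_singleton x)

theorem pvContainsEq {s t : List String} {x : String} (h : x ∈ s ↔ x ∈ t) :
    PySem.Set.contains s x = PySem.Set.contains t x := by
  have h1 := PySem.Set.contains_iff s x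
  have h2 := PySem.Set.contains_iff t x
  cases hs : PySem.Set.contains s x <;> cases ht : PySem.Set.contains t x <;> simp_all

-- the successor map built by A stores exactly the edges of the lattice
theorem pvMapGetDGen (l : List (String × String)) :
    ∀ (d : PySem.Dict String (PySem.Set String)) (x y : String),
    y ∈ (l.foldl (fun d p => d.insert p.1 (PySem.Set.add (d.getD p.1 PySem.Set.empty) p.2)) d).getD x PySem.Set.empty
      ↔ y ∈ d.getD x PySem.Set.empty ∨ (x, y) ∈ l := by
  induction l with
  | nil => simp [List.foldl]
  | cons p l ih =>
    obtain ⟨a, b⟩ := p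
    intro d x y
    rw [List.foldl_cons, ih, PySem.Dict.getD_insert]
    by_cases hx : x = a
    · subst hx
      rw [if_pos rfl, PySem.Set.mem_add]
      simp only [List.mem_cons, Prod.mk.injEq]
      tauto
    · rw [if_neg hx]
      simp only [List.mem_cons, Prod.mk.injEq]
      tauto

theorem pvMapGetD (lattice : List (String × String)) (x y : String) :
    y ∈ (aLatticeMap lattice).getD x PySem.Set.empty ↔ (x, y) ∈ lattice := by
  unfold aLatticeMap
  rw [pvMapGetDGen]
  simp [PySem.Dict.getD_empty, PySem.Set.empty]

-- A's while loop: with enough fuel it keeps reach inside univ, absorbs the worklist, and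
-- its result is closed under the successor map
theorem pvALoopSpec (m : PySem.Dict String (PySem.Set String)) (univ : List String)
    (hsucc : ∀ x y, y ∈ m.getD x PySem.Set.empty → y ∈ univ) :
    ∀ fuel reach t, reach.Nodup → t.Nodup →
    (∀ x ∈ reach, x ∈ univ) → (∀ x ∈ t, x ∈ univ) →
    (∀ x ∈ reach, ∀ y ∈ m.getD x PySem.Set.empty, y ∈ reach ∨ y ∈ t) →
    pvMu univ reach t < fuel →
    (∀ x ∈ reach, x ∈ aLoop m fuel reach t) ∧ (∀ x ∈ t, x ∈ aLoop m fuel reach t) ∧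
    (aLoop m fuel reach t).Nodup ∧ (∀ x ∈ aLoop m fuel reach t, x ∈ univ) ∧
    (∀ x ∈ aLoop m fuel reach t, ∀ y ∈ m.getD x PySem.Set.empty, y ∈ aLoop m fuel reach t) := by
  intro fuel
  induction fuel with
  | zero => intro reach t _ _ _ _ _ hmu; omega
  | succ fuel ih =>
    intro reach t hrn htn hru htu hH hmu
    match t with
    | [] =>
      refine ⟨fun x hx => hx, by simp, hrn, hru, ?_⟩
      intro x hx y hy
      rcases hH x hx y hy with h | h
      · exact h
      · simp at h
    | next :: rest =>
      have hnextu : next ∈ univ := htu next (by simp)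
      by_cases hnx : next ∈ reach
      · -- next already reached: reach' = reach and the diff is contained in rest
        have hre : PySem.Set.add reach next = reach := PySem.Set.add_of_mem hnx
        have hdiff : ∀ y ∈ PySem.Set.diff (m.getD next PySem.Set.empty) reach, y ∈ rest := by
          intro y hy
          obtain ⟨hy1, hy2⟩ := (PySem.Set.mem_diff _ _ _).mp hy
          rcases hH next hnx y hy1 with h | h
          · exact absurd h hy2
          · rcases List.mem_cons.mp h with h | h
            · exact absurd (h ▸ hnx) hy2
            · exact h
        have hstep : aLoop m (fuel+1) reach (next :: rest) = aLoop m fuel reach rest := by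
          show aLoop m fuel (PySem.Set.add reach next)
            (PySem.Set.union rest (PySem.Set.diff (m.getD next PySem.Set.empty) (PySem.Set.add reach next))) = _
          rw [hre, pvUnionSubset hdiff]
        rw [hstep]
        have hrest : pvMu univ reach rest < fuel := by
          unfold pvMu at hmu ⊢; simp only [List.length_cons] at hmu; omega
        obtain ⟨h1, h2, h3, h4, h5⟩ := ih reach rest hrn (List.nodup_cons.mp htn).2 hru
          (fun x hx => htu x (by simp [hx]))
          (by intro x hx y hy
              rcases hH x hx y hy with h | h
              · exact Or.inl h
              · rcases List.mem_cons.mp h with h | h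
                · exact Or.inl (h ▸ hnx)
                · exact Or.inr h)
          hrest
        refine ⟨h1, ?_, h3, h4, h5⟩
        intro x hx
        rcases List.mem_cons.mp hx with h | h
        · exact h1 x (h ▸ hnx)
        · exact h2 x h
      · -- next is new: the unreached part of univ strictly shrinks
        have hre : PySem.Set.add reach next = reach ++ [next] := PySem.Set.add_of_not_mem hnx
        set reach' := PySem.Set.add reach next with hre'
        set t' := PySem.Set.union rest (PySem.Set.diff (m.getD next PySem.Set.empty) reach') with ht'
        have hmemr' : ∀ z, z ∈ reach' ↔ z ∈ reach ∨ z = next := fun z => PySem.Set.mem_add reach next z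
        have hr'n : reach'.Nodup := by
          rw [hre]
          simp only [List.nodup_append, List.nodup_singleton]
          refine ⟨hrn, trivial, ?_⟩
          intro a ha b hb
          rw [List.mem_singleton] at hb
          exact fun hc => hnx ((hb ▸ hc) ▸ ha)
        have ht'n : t'.Nodup := PySem.Set.nodup_union (s := rest) _ (List.nodup_cons.mp htn).2
        have hr'u : ∀ x ∈ reach', x ∈ univ := by
          intro x hx; rcases (hmemr' x).mp hx with h | h
          · exact hru x h
          · exact h ▸ hnextu
        have ht'u : ∀ x ∈ t', x ∈ univ := by
          intro x hx
          rcases (PySem.Set.mem_union _ _ _).mp hx with h | h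
          · exact htu x (by simp [h])
          · exact hsucc next x ((PySem.Set.mem_diff _ _ _).mp h).1
        have hH' : ∀ x ∈ reach', ∀ y ∈ m.getD x PySem.Set.empty, y ∈ reach' ∨ y ∈ t' := by
          intro x hx y hy
          rcases (hmemr' x).mp hx with h | h
          · rcases hH x h y hy with h2 | h2
            · exact Or.inl ((hmemr' y).mpr (Or.inl h2))
            · rcases List.mem_cons.mp h2 with h3 | h3
              · exact Or.inl ((hmemr' y).mpr (Or.inr h3))
              · exact Or.inr ((PySem.Set.mem_union _ _ _).mpr (Or.inl h3))
          · subst h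
            by_cases hyr : y ∈ reach'
            · exact Or.inl hyr
            · exact Or.inr ((PySem.Set.mem_union _ _ _).mpr
                (Or.inr ((PySem.Set.mem_diff _ _ _).mpr ⟨hy, hyr⟩)))
        have hmu' : pvMu univ reach' t' < fuel := by
          have hsub : ∀ x, x ∈ reach → x ∈ reach' := fun x h => (hmemr' x).mpr (Or.inl h)
          have hnextf : next ∈ univ.filter (fun x => decide (x ∉ reach)) :=
            List.mem_filter.mpr ⟨hnextu, by simpa using hnx⟩
          have hk1 : 1 ≤ (univ.filter (fun x => decide (x ∉ reach))).length :=
            List.length_pos_of_mem hnextf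
          have hkk : (univ.filter (fun x => decide (x ∉ reach'))).length
              < (univ.filter (fun x => decide (x ∉ reach))).length := by
            have heq : univ.filter (fun x => decide (x ∉ reach'))
                = (univ.filter (fun x => decide (x ∉ reach))).filter (fun x => decide (x ∉ reach')) := by
              rw [List.filter_filter]
              apply List.filter_congr
              intro x _
              by_cases h : x ∈ reach'
              · simp [h]
              · have hxr : x ∉ reach := fun hc => h (hsub x hc)
                simp [h, hxr]
            rw [heq]
            apply (List.length_filter_lt_length_iff_exists).mpr
            exact ⟨next, hnextf, by simpa using (hmemr' next).mpr (Or.inr rfl)⟩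
          have ht'len : t'.length ≤ univ.length := pvNodupSubsetLength ht'n ht'u
          unfold pvMu at hmu ⊢
          simp only [List.length_cons] at hmu
          obtain ⟨k0, hk0⟩ : ∃ k0, (univ.filter (fun x => decide (x ∉ reach))).length = k0 + 1 :=
            ⟨(univ.filter (fun x => decide (x ∉ reach))).length - 1, by omega⟩
          rw [hk0] at hmu hkk
          have h1 : (univ.filter (fun x => decide (x ∉ reach'))).length * (univ.length + 2)
              ≤ k0 * (univ.length + 2) := Nat.mul_le_mul_right _ (by omega)
          have h2 : (k0 + 1) * (univ.length + 2) = k0 * (univ.length + 2) + (univ.length + 2) := by ring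
          rw [h2] at hmu
          linarith
        have hstep : aLoop m (fuel+1) reach (next :: rest) = aLoop m fuel reach' t' := rfl
        rw [hstep]
        obtain ⟨h1, h2, h3, h4, h5⟩ := ih reach' t' hr'n ht'n hr'u ht'u hH' hmu'
        refine ⟨?_, ?_, h3, h4, h5⟩
        · intro x hx; exact h1 x ((hmemr' x).mpr (Or.inl hx))
        · intro x hx
          rcases List.mem_cons.mp hx with h | h
          · exact h1 x ((hmemr' x).mpr (Or.inr h))
          · exact h2 x ((PySem.Set.mem_union _ _ _).mpr (Or.inl h))

-- A's while loop never leaves a closed superset of reach and the worklist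
theorem pvALoopSubset (m : PySem.Dict String (PySem.Set String)) (S : List String)
    (hS : ∀ x ∈ S, ∀ y ∈ m.getD x PySem.Set.empty, y ∈ S) :
    ∀ fuel reach t, (∀ x ∈ reach, x ∈ S) → (∀ x ∈ t, x ∈ S) →
    ∀ x ∈ aLoop m fuel reach t, x ∈ S := by
  intro fuel
  induction fuel with
  | zero => intro reach t hr _ x hx; exact hr x hx
  | succ fuel ih =>
    intro reach t hr ht x hx
    match t with
    | [] => exact hr x hx
    | next :: rest =>
      have hnext : next ∈ S := ht next (by simp)
      refine ih (PySem.Set.add reach next) _ ?_ ?_ x hx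
      · intro z hz
        rcases (PySem.Set.mem_add _ _ _).mp hz with h | h
        · exact hr z h
        · exact h ▸ hnext
      · intro z hz
        rcases (PySem.Set.mem_union _ _ _).mp hz with h | h
        · exact ht z (by simp [h])
        · exact hS next hnext z ((PySem.Set.mem_diff _ _ _).mp h).1

-- the fuel passed by filter_for_starting_states dominates the measure
theorem pvFuelBig (univ reach : List String) (item : String) :
    pvMu univ reach [item] < (univ.length + 2) ^ 2 := by
  unfold pvMu
  have hk : (univ.filter (fun x => decide (x ∉ reach))).length ≤ univ.length :=
    List.length_filter_le _ univ
  have h1 : (univ.filter (fun x => decide (x ∉ reach))).length * (univ.length + 2)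
      ≤ univ.length * (univ.length + 2) := Nat.mul_le_mul_right _ hk
  have h2 : (univ.length + 2) ^ 2 = univ.length * (univ.length + 2) + 2 * univ.length + 4 := by ring
  simp only [List.length_singleton]
  omega

-- A's outer for loop: the final reach set keeps reach, absorbs every starting state,
-- stays inside univ and is closed under the successor map
theorem pvAFoldSpec (m : PySem.Dict String (PySem.Set String)) (univ : List String)
    (hsucc : ∀ x y, y ∈ m.getD x PySem.Set.empty → y ∈ univ) (F : Nat)
    (hF : ∀ reach item, pvMu univ reach [item] < F) :
    ∀ (ss : List String) (reach : PySem.Set String), reach.Nodup → (∀ x ∈ reach, x ∈ univ) →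
    (∀ x ∈ reach, ∀ y ∈ m.getD x PySem.Set.empty, y ∈ reach) →
    (∀ x ∈ ss, x ∈ univ) →
    (∀ x ∈ reach, x ∈ ss.foldl (fun r item => aLoop m F r (PySem.Set.ofList [item])) reach) ∧
    (∀ x ∈ ss, x ∈ ss.foldl (fun r item => aLoop m F r (PySem.Set.ofList [item])) reach) ∧
    ((ss.foldl (fun r item => aLoop m F r (PySem.Set.ofList [item])) reach).Nodup) ∧
    (∀ x ∈ ss.foldl (fun r item => aLoop m F r (PySem.Set.ofList [item])) reach, x ∈ univ) ∧
    (∀ x ∈ ss.foldl (fun r item => aLoop m F r (PySem.Set.ofList [item])) reach,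
      ∀ y ∈ m.getD x PySem.Set.empty, y ∈ ss.foldl (fun r item => aLoop m F r (PySem.Set.ofList [item])) reach) := by
  intro ss
  induction ss with
  | nil => intro reach hn hu hc _; exact ⟨fun x hx => hx, by simp, hn, hu, hc⟩
  | cons item ss ih =>
    intro reach hn hu hc hssu
    have hitemu : item ∈ univ := hssu item (by simp)
    obtain ⟨g1, g2, g3, g4, g5⟩ := pvALoopSpec m univ hsucc F reach [item] hn
      (List.nodup_singleton item) hu (by intro x hx; rw [List.mem_singleton] at hx; exact hx ▸ hitemu)
      (by intro x hx y hy; exact Or.inl (hc x hx y hy))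
      (hF reach item)
    obtain ⟨i0, i1, i2, i3, i4⟩ := ih (aLoop m F reach [item]) g3 g4 g5
      (fun x hx => hssu x (by simp [hx]))
    rw [List.foldl_cons, pvSingleton item]
    refine ⟨fun x hx => i0 x (g1 x hx), ?_, i2, i3, i4⟩
    intro x hx
    rcases List.mem_cons.mp hx with h | h
    · subst h; exact i0 x (g2 x (by simp))
    · exact i1 x h

-- A's outer loop never leaves a closed superset of reach and the starting states
theorem pvAFoldSubset (m : PySem.Dict String (PySem.Set String)) (S : List String)
    (hS : ∀ x ∈ S, ∀ y ∈ m.getD x PySem.Set.empty, y ∈ S) (F : Nat) :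
    ∀ (ss : List String) (reach : PySem.Set String), (∀ x ∈ reach, x ∈ S) → (∀ x ∈ ss, x ∈ S) →
    ∀ x ∈ ss.foldl (fun r item => aLoop m F r (PySem.Set.ofList [item])) reach, x ∈ S := by
  intro ss
  induction ss with
  | nil => intro reach hr _ x hx; exact hr x hx
  | cons item ss ih =>
    intro reach hr hss x hx
    rw [List.foldl_cons] at hx
    refine ih (aLoop m F reach (PySem.Set.ofList [item])) ?_ (fun z hz => hss z (by simp [hz])) x hx
    rw [pvSingleton]
    exact pvALoopSubset m S hS F reach [item] hr
      (by intro z hz; rw [List.mem_singleton] at hz; exact hz ▸ hss item (by simp))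

-- ---- B side ----

theorem pvBStepMono (lattice : List (String × String)) (r : PySem.Set String) :
    ∀ x ∈ r, x ∈ bStep lattice r := by
  intro x hx; exact (PySem.Set.mem_union _ _ _).mpr (Or.inl hx)

theorem pvBStepNodup (lattice : List (String × String)) (r : PySem.Set String) (h : r.Nodup) :
    (bStep lattice r).Nodup := PySem.Set.nodup_union (s := r) _ h

theorem pvBStepBound (lattice : List (String × String)) (r : PySem.Set String) :
    ∀ x ∈ bStep lattice r, x ∈ r ∨ x ∈ lattice.map Prod.snd := by
  intro x hx
  rcases (PySem.Set.mem_union _ _ _).mp hx with h | h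
  · exact Or.inl h
  · obtain ⟨p, hp, hpx⟩ := List.mem_map.mp h
    exact Or.inr (List.mem_map.mpr ⟨p, (List.mem_filter.mp hp).1, hpx⟩)

theorem pvBStepSubset (lattice : List (String × String)) (S : List String)
    (hS : pvClosed lattice S) (r : PySem.Set String) (hr : ∀ x ∈ r, x ∈ S) :
    ∀ x ∈ bStep lattice r, x ∈ S := by
  intro x hx
  rcases (PySem.Set.mem_union _ _ _).mp hx with h | h
  · exact hr x h
  · obtain ⟨p, hp, hpx⟩ := List.mem_map.mp h
    obtain ⟨hpl, hpc⟩ := List.mem_filter.mp hp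
    exact hpx ▸ hS p hpl (hr p.1 ((PySem.Set.contains_iff _ _).mp hpc))

theorem pvBClosedFix (lattice : List (String × String)) (r : PySem.Set String)
    (h : pvClosed lattice r) : bStep lattice r = r := by
  apply pvUnionSubset
  intro x hx
  obtain ⟨p, hp, hpx⟩ := List.mem_map.mp hx
  obtain ⟨hpl, hpc⟩ := List.mem_filter.mp hp
  exact hpx ▸ h p hpl ((PySem.Set.contains_iff _ _).mp hpc)

theorem pvBGrow (lattice : List (String × String)) (r : PySem.Set String)
    (h : ¬ pvClosed lattice r) : r.length + 1 ≤ (bStep lattice r).length := by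
  unfold pvClosed at h
  push Not at h
  obtain ⟨p, hpl, hp1, hp2⟩ := h
  have hmem : p.2 ∈ bStep lattice r :=
    (PySem.Set.mem_union _ _ _).mpr (Or.inr (List.mem_map.mpr
      ⟨p, List.mem_filter.mpr ⟨hpl, (PySem.Set.contains_iff _ _).mpr hp1⟩, rfl⟩))
  obtain ⟨ext, hext⟩ := pvUnionAppend r ((lattice.filter (fun p => PySem.Set.contains r p.1)).map Prod.snd)
  have hb : bStep lattice r = r ++ ext := hext
  rw [hb] at hmem ⊢
  rcases List.mem_append.mp hmem with h | h
  · exact absurd h hp2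
  · have hne : ext ≠ [] := List.ne_nil_of_mem h
    have : 1 ≤ ext.length := List.length_pos_of_ne_nil hne
    simp [List.length_append]; omega

def pvIter (lattice : List (String × String)) : Nat → PySem.Set String → PySem.Set String
  | 0, r => r
  | n+1, r => pvIter lattice n (bStep lattice r)

theorem pvFoldlIter (lattice : List (String × String)) :
    ∀ (l : List Nat) (r : PySem.Set String),
      l.foldl (fun r _ => bStep lattice r) r = pvIter lattice l.length r := by
  intro l
  induction l with
  | nil => intro r; rfl
  | cons a l ih => intro r; rw [List.foldl_cons, ih]; rfl

theorem pvIterProps (lattice : List (String × String)) :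
    ∀ (k : Nat) (r : PySem.Set String), r.Nodup →
    (pvIter lattice k r).Nodup ∧ (∀ x ∈ r, x ∈ pvIter lattice k r) ∧
    (∀ x ∈ pvIter lattice k r, x ∈ r ∨ x ∈ lattice.map Prod.snd) := by
  intro k
  induction k with
  | zero => intro r h; exact ⟨h, fun x hx => hx, fun x hx => Or.inl hx⟩
  | succ k ih =>
    intro r h
    obtain ⟨h1, h2, h3⟩ := ih (bStep lattice r) (pvBStepNodup lattice r h)
    refine ⟨h1, fun x hx => h2 x (pvBStepMono lattice r x hx), ?_⟩
    intro x hx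
    rcases h3 x hx with hh | hh
    · exact pvBStepBound lattice r x hh
    · exact Or.inr hh

theorem pvIterSubset (lattice : List (String × String)) (S : List String)
    (hS : pvClosed lattice S) :
    ∀ (k : Nat) (r : PySem.Set String), (∀ x ∈ r, x ∈ S) → ∀ x ∈ pvIter lattice k r, x ∈ S := by
  intro k
  induction k with
  | zero => intro r hr x hx; exact hr x hx
  | succ k ih => intro r hr x hx; exact ih (bStep lattice r) (pvBStepSubset lattice S hS r hr) x hx

theorem pvIterClosedStable (lattice : List (String × String)) :
    ∀ (k : Nat) (r : PySem.Set String), pvClosed lattice r → pvIter lattice k r = r := by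
  intro k
  induction k with
  | zero => intro r _; rfl
  | succ k ih =>
    intro r h
    show pvIter lattice k (bStep lattice r) = r
    rw [pvBClosedFix lattice r h]
    exact ih r h

theorem pvIterAdd (lattice : List (String × String)) :
    ∀ (a b : Nat) (r : PySem.Set String),
      pvIter lattice (a + b) r = pvIter lattice b (pvIter lattice a r) := by
  intro a
  induction a with
  | zero => intro b r; simp [pvIter]
  | succ a ih =>
    intro b r
    have hab : a + 1 + b = (a + b) + 1 := by omega
    rw [hab]
    show pvIter lattice (a + b) (bStep lattice r) = _
    rw [ih b (bStep lattice r)]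
    rfl

theorem pvIterGrow (lattice : List (String × String)) :
    ∀ (k : Nat) (r : PySem.Set String), r.Nodup →
    (∀ j < k, ¬ pvClosed lattice (pvIter lattice j r)) →
    r.length + k ≤ (pvIter lattice k r).length := by
  intro k
  induction k with
  | zero => intro r _ _; simp [pvIter]
  | succ k ih =>
    intro r hn hnc
    have h0 : ¬ pvClosed lattice r := hnc 0 (by omega)
    have hg := pvBGrow lattice r h0
    have hrec := ih (bStep lattice r) (pvBStepNodup lattice r hn)
      (fun j hj => hnc (j+1) (by omega))
    show r.length + (k+1) ≤ (pvIter lattice k (bStep lattice r)).length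
    omega

-- B's reach after len(lattice) rounds is closed: either some round was already a fixpoint,
-- or every round added a fresh edge target, so all lattice.length targets are in
theorem pvBClosedMain (lattice : List (String × String)) (r : PySem.Set String) (hn : r.Nodup) :
    pvClosed lattice (pvIter lattice lattice.length r) := by
  by_cases hex : ∃ j < lattice.length, pvClosed lattice (pvIter lattice j r)
  · obtain ⟨j, hj, hcl⟩ := hex
    have hsplit : lattice.length = j + (lattice.length - j) := by omega
    rw [hsplit, pvIterAdd, pvIterClosedStable lattice _ _ hcl]
    exact hcl
  · push Not at hex
    obtain ⟨hRn, hRm, hRb⟩ := pvIterProps lattice lattice.length r hn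
    have hgrow : r.length + lattice.length ≤ (pvIter lattice lattice.length r).length :=
      pvIterGrow lattice lattice.length r hn hex
    have hcard : (pvIter lattice lattice.length r).length = (pvIter lattice lattice.length r).toFinset.card :=
      (List.toFinset_card_of_nodup hRn).symm
    have hsub : (pvIter lattice lattice.length r).toFinset ⊆ r.toFinset ∪ (lattice.map Prod.snd).toFinset := by
      intro x hx
      rw [List.mem_toFinset] at hx
      rcases hRb x hx with h | h
      · exact Finset.mem_union_left _ (List.mem_toFinset.mpr h)
      · exact Finset.mem_union_right _ (List.mem_toFinset.mpr h)
    have hcard2 : (r.toFinset ∪ (lattice.map Prod.snd).toFinset).card ≤ r.length + lattice.length := by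
      calc (r.toFinset ∪ (lattice.map Prod.snd).toFinset).card
          ≤ r.toFinset.card + (lattice.map Prod.snd).toFinset.card := Finset.card_union_le _ _
        _ ≤ r.length + lattice.length := by
            have h1 : r.toFinset.card ≤ r.length := List.toFinset_card_le r
            have h2 : (lattice.map Prod.snd).toFinset.card ≤ lattice.length := by
              calc (lattice.map Prod.snd).toFinset.card ≤ (lattice.map Prod.snd).length :=
                    List.toFinset_card_le _
                _ = lattice.length := by simp
            omega
    have heq : (pvIter lattice lattice.length r).toFinset = r.toFinset ∪ (lattice.map Prod.snd).toFinset := by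
      apply Finset.eq_of_subset_of_card_le hsub
      omega
    have htarg : ∀ x ∈ lattice.map Prod.snd, x ∈ pvIter lattice lattice.length r := by
      intro x hx
      have : x ∈ (pvIter lattice lattice.length r).toFinset :=
        heq ▸ Finset.mem_union_right _ (List.mem_toFinset.mpr hx)
      exact List.mem_toFinset.mp this
    intro p hp _
    exact htarg p.2 (List.mem_map.mpr ⟨p, hp, rfl⟩)

-- ---- assembly ----

theorem pvMain (lattice : List (String × String)) (ss : List String) :
    filter_for_starting_states lattice ss = filter_for_starting_states_alt lattice ss := by
  unfold filter_for_starting_states filter_for_starting_states_alt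
  have hRB : (List.range lattice.length).foldl (fun r _ => bStep lattice r) (PySem.Set.ofList ss)
      = pvIter lattice lattice.length (PySem.Set.ofList ss) := by
    rw [pvFoldlIter, List.length_range]
  rw [hRB]
  set m := aLatticeMap lattice with hm
  set univ := PySem.Set.ofList (ss ++ lattice.map Prod.snd) with huniv
  have hsucc : ∀ x y, y ∈ m.getD x PySem.Set.empty → y ∈ univ := by
    intro x y hy
    have hxy : (x, y) ∈ lattice := (pvMapGetD lattice x y).mp hy
    exact (PySem.Set.mem_ofList _ _).mpr (List.mem_append.mpr (Or.inr (List.mem_map.mpr ⟨(x, y), hxy, rfl⟩)))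
  have hF : ∀ reach item, pvMu univ reach [item] < aFuel lattice ss := by
    intro reach item
    exact pvFuelBig univ reach item
  set RA := ss.foldl (fun reach item => aLoop m (aFuel lattice ss) reach (PySem.Set.ofList [item]))
    PySem.Set.empty with hRA
  set RB := pvIter lattice lattice.length (PySem.Set.ofList ss) with hRBdef
  obtain ⟨_, hssRA, hRAn, hRAu, hRAcm⟩ := pvAFoldSpec m univ hsucc (aFuel lattice ss) hF ss
    PySem.Set.empty List.nodup_nil (by simp [PySem.Set.empty]) (by simp [PySem.Set.empty])
    (fun x hx => (PySem.Set.mem_ofList _ _).mpr (List.mem_append.mpr (Or.inl hx)))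
  have hRAce : pvClosed lattice RA := by
    intro p hp h1
    exact hRAcm p.1 h1 p.2 ((pvMapGetD lattice p.1 p.2).mpr hp)
  obtain ⟨hRBn, hS0RB, _⟩ := pvIterProps lattice lattice.length (PySem.Set.ofList ss)
    (PySem.Set.nodup_ofList ss)
  have hRBce : pvClosed lattice RB := pvBClosedMain lattice (PySem.Set.ofList ss) (PySem.Set.nodup_ofList ss)
  have hRBcm : ∀ x ∈ RB, ∀ y ∈ m.getD x PySem.Set.empty, y ∈ RB := by
    intro x hx y hy
    exact hRBce (x, y) ((pvMapGetD lattice x y).mp hy) hx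
  have hAB : ∀ x ∈ RA, x ∈ RB := by
    apply pvAFoldSubset m RB hRBcm (aFuel lattice ss) ss PySem.Set.empty
    · simp [PySem.Set.empty]
    · intro x hx
      exact hS0RB x ((PySem.Set.mem_ofList _ _).mpr hx)
  have hBA : ∀ x ∈ RB, x ∈ RA := by
    apply pvIterSubset lattice RA hRAce lattice.length (PySem.Set.ofList ss)
    intro x hx
    exact hssRA x ((PySem.Set.mem_ofList _ _).mp hx)
  apply List.filter_congr
  intro p hp
  exact pvContainsEq ⟨fun h => hAB p.1 h, fun h => hBA p.1 h⟩

-- ===== VERDICT (by name: the statement is the Claim_ definition above) =====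
theorem filter_for_starting_states_spec : Claim_equal_filter_for_starting_states := by
  intro lattice starting_states _
  unfold Spec_filter_for_starting_states
  exact pvMain lattice starting_states
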